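-- pv_equiv track=rewrite | github.com/renjieliu/leetcode | 1500_1999/1794.py | countQuadruples
-- ===== SOURCE A (Python) =====
-- def countQuadruples(firstString: str, secondString: str) -> int:
--     # to make endFirst-startSecond minimal, is to make endFirst small, and startSecond large
--     loc = {}
--     for i , c in enumerate(secondString): #find loc of each character in secondString
--         if c not in loc:
--             loc[c] = []
--         loc[c].append(i)
--
--     distance = {}
--     for i, c in enumerate(firstString): # just check one letter, and see the diff with curr loc and the last loc in secondString
--         if c in loc:
--             if i - loc[c][-1] not in distance:
--                 distance[i-loc[c][-1]] =0
--             distance[i-loc[c][-1]] += 1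
--     return distance[min(distance.keys())] if distance else 0
-- ===== SOURCE B (Python) =====
-- def countQuadruples(firstString: str, secondString: str) -> int:
--     # per-character reduction: first occurrence in firstString, last occurrence in secondString
--     first = {}
--     for i, c in enumerate(firstString):
--         first.setdefault(c, i)
--     last = {}
--     for i, c in enumerate(secondString):
--         last[c] = i
--     dists = [i - last[c] for c, i in first.items() if c in last]
--     return dists.count(min(dists)) if dists else 0
-- ===== Notes on version B (the rewrite author's own statement) =====
-- stated objective: simpler
-- what changed: A reduces per POSITION of firstString: it builds per-character position lists for secondString, then a histogram dict of the distance of every position, and indexes it at the minimal key; B reduces per CHARACTER: it precomputes first[c] (first index in firstString) and last[c] (last index in secondString), forms one distance per character present in both, and returns dists.count(min(dists)) - correct because each character attains the global minimum only at its first occurrence. No position lists, no histogram dict; the count/min run over at most one entry per distinct character.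
import Mathlib
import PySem

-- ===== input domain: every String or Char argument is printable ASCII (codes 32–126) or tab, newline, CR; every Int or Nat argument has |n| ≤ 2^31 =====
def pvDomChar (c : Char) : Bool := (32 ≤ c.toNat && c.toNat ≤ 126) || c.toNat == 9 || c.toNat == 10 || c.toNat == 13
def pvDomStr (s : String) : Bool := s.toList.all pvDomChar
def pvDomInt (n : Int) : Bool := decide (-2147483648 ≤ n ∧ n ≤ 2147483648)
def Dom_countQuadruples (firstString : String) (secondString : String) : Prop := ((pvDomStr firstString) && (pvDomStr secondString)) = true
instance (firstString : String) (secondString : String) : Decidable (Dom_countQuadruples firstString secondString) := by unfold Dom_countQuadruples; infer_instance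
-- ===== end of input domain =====

-- B replaces A's per-position distance histogram (per-char position lists over secondString + a
-- distance-count dict over every position of firstString) by a per-CHARACTER reduction over two
-- precomputed tables (first occurrence in firstString, last occurrence in secondString): simpler.

-- ===== PORT A =====
-- loc: for each character of secondString, the list of its positions, in order
def pvLocA (s : List Char) : PySem.Dict Char (List Int) :=
  (PySem.List.enumerate s).foldl
    (fun loc ic =>
      let loc := loc.setdefault ic.2 []                  -- if c not in loc: loc[c] = []
      loc.insert ic.2 (loc.getD ic.2 [] ++ [ic.1]))      -- loc[c].append(i)
    PySem.Dict.empty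

-- the distance histogram over firstString; loc[c][-1] is exact here: the stored list is never
-- empty, so pyGetD l (-1) 0 is its last element
def pvDistanceA (loc : PySem.Dict Char (List Int)) (f : List Char) : PySem.Dict Int Int :=
  (PySem.List.enumerate f).foldl
    (fun dist ic =>
      match loc.get? ic.2 with
      | none => dist
      | some l =>
        let d := ic.1 - PySem.List.pyGetD l (-1) 0
        let dist := if dist.contains d then dist else dist.insert d 0   -- if d not in distance: distance[d] = 0
        dist.insert d (dist.getD d 0 + 1))                              -- distance[d] += 1
    PySem.Dict.empty

-- 'distance[min(distance.keys())] if distance else 0': keys is empty iff the dict is, and the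
-- minimal key is always present, so getD m 0 is exact
def countQuadruples (firstString : String) (secondString : String) : Int :=
  match PySem.List.min? (pvDistanceA (pvLocA secondString.toList) firstString.toList).keys (fun x => x) with
  | none => 0
  | some m => (pvDistanceA (pvLocA secondString.toList) firstString.toList).getD m 0

-- ===== PORT B =====
-- first[c] = first index of c in firstString ('first.setdefault(c, i)')
def pvFirstB (f : List Char) : PySem.Dict Char Int :=
  (PySem.List.enumerate f).foldl (fun d ic => d.setdefault ic.2 ic.1) PySem.Dict.empty

-- last[c] = last index of c in secondString (plain overwrite)
def pvLastB (s : List Char) : PySem.Dict Char Int :=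
  (PySem.List.enumerate s).foldl (fun d ic => d.insert ic.2 ic.1) PySem.Dict.empty

-- '[i - last[c] for c, i in first.items() if c in last]'
def pvDistsB (first : PySem.Dict Char Int) (last : PySem.Dict Char Int) : List Int :=
  first.items.filterMap (fun ci => (last.get? ci.1).map (fun j => ci.2 - j))

-- 'dists.count(min(dists)) if dists else 0'
def countQuadruples_alt (firstString : String) (secondString : String) : Int :=
  match PySem.List.min? (pvDistsB (pvFirstB firstString.toList) (pvLastB secondString.toList)) (fun x => x) with
  | none => 0
  | some m => (PySem.List.count (pvDistsB (pvFirstB firstString.toList) (pvLastB secondString.toList)) m : Int)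

-- ===== PRECONDITION & SPEC =====
def Spec_countQuadruples (firstString : String) (secondString : String) (out : Int) : Prop := out = countQuadruples_alt firstString secondString
instance (firstString : String) (secondString : String) (out : Int) : Decidable (Spec_countQuadruples firstString secondString out) := by unfold Spec_countQuadruples; infer_instance

-- ===== CLAIM (what is proved, stated in full; the proofs are below) =====
def Claim_equal_countQuadruples : Prop := ∀ (firstString : String) (secondString : String), Dom_countQuadruples firstString secondString → Spec_countQuadruples firstString secondString (countQuadruples firstString secondString)

-- ===== LEMMAS AND PROOFS =====

-- the list of per-position distances A histograms: one per position of firstString whose char occurs in secondString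
def pvDists (last : PySem.Dict Char Int) (f : List Char) : List Int :=
  (PySem.List.enumerate f).filterMap (fun ic => (last.get? ic.2).map (fun j => ic.1 - j))

-- A's loc table and the last table agree: taking the last stored position IS the last-index table
lemma pv_loc_last_gen (ps : List (Int × Char)) (L : PySem.Dict Char (List Int))
    (La : PySem.Dict Char Int)
    (hinv : ∀ c, (L.get? c).map (fun l => PySem.List.pyGetD l (-1) 0) = La.get? c) :
    ∀ c, ((ps.foldl (fun loc ic =>
            let loc := loc.setdefault ic.2 []
            loc.insert ic.2 (loc.getD ic.2 [] ++ [ic.1])) L).get? c).map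
              (fun l => PySem.List.pyGetD l (-1) 0)
        = (ps.foldl (fun d ic => d.insert ic.2 ic.1) La).get? c := by
  induction ps generalizing L La with
  | nil => exact hinv
  | cons p ps ih =>
    simp only [List.foldl_cons]
    apply ih
    intro c
    by_cases hc : c = p.2
    · subst hc
      simp [PySem.Dict.get?_insert_self]
    · simp [PySem.Dict.get?_insert_of_ne _ _ hc, PySem.Dict.get?_setdefault_of_ne _ _ hc, hinv c]

lemma pv_loc_last_rel (s : List Char) (c : Char) :
    ((pvLocA s).get? c).map (fun l => PySem.List.pyGetD l (-1) 0) = (pvLastB s).get? c :=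
  pv_loc_last_gen _ _ _ (fun c => by simp [PySem.Dict.get?_empty]) c

-- folding a step that skips 'none' items is folding over the filterMap
lemma pv_foldl_skip_none {α β γ : Type} (g : β → Option γ) (h : α → γ → α) (F : α → β → α)
    (hF : ∀ a x, F a x = match g x with | none => a | some y => h a y) :
    ∀ (ps : List β) (a : α), ps.foldl F a = (ps.filterMap g).foldl h a := by
  intro ps
  induction ps with
  | nil => intro a; rfl
  | cons p ps ih =>
    intro a
    rw [List.foldl_cons, hF]
    cases hg : g p <;> simp [hg, ih]

lemma pv_insert_getD_eq_modify (d : PySem.Dict Int Int) (k : Int) :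
    d.insert k (d.getD k 0 + 1) = d.modify k 0 (· + 1) :=
  PySem.Dict.ext_iff.mpr rfl

-- A's histogram step is a counter step
lemma pv_counter_step (d : PySem.Dict Int Int) (k : Int) :
    ((if d.contains k then d else d.insert k 0).insert k
      ((if d.contains k then d else d.insert k 0).getD k 0 + 1)) = d.modify k 0 (· + 1) := by
  by_cases h : d.contains k = true
  · simp only [h, if_true]
    exact pv_insert_getD_eq_modify d k
  · simp only [h, Bool.false_eq_true, if_false]
    rw [pv_insert_getD_eq_modify, ← pv_insert_getD_eq_modify, ← pv_insert_getD_eq_modify,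
        PySem.Dict.getD_insert_self, PySem.Dict.insert_insert_self]
    have h2 : d.get? k = none := by
      rw [PySem.Dict.get?_eq_none_iff_contains]
      exact Bool.not_eq_true _ ▸ h
    simp only [PySem.Dict.getD, h2, Option.getD_none]

-- A's distance dict is the counter of the per-position distance list
lemma pv_distanceA_eq_counter (f s : List Char) :
    pvDistanceA (pvLocA s) f = PySem.Dict.counter (pvDists (pvLastB s) f) := by
  unfold pvDistanceA pvDists
  rw [PySem.Dict.counter_eq_foldl]
  refine pv_foldl_skip_none _ _ _ ?_ _ _
  intro dist ic
  have hrel := pv_loc_last_rel s ic.2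
  cases hl : (pvLocA s).get? ic.2 with
  | none => rw [hl] at hrel; rw [← hrel]; rfl
  | some l =>
    rw [hl] at hrel
    rw [← hrel]
    simp only [Option.map_some]
    exact pv_counter_step dist (ic.1 - PySem.List.pyGetD l (-1) 0)

-- min over the dedup of a list is min over the list (same value)
lemma pv_min_ofList (L : List Int) :
    PySem.List.min? (PySem.Set.ofList L) (fun x => x) = PySem.List.min? L (fun x => x) := by
  cases hL : PySem.List.min? L (fun x => x) with
  | none =>
    rw [PySem.List.min?_eq_none_iff] at hL
    subst hL
    rfl
  | some m =>
    have hmem := PySem.List.min?_mem hL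
    cases hS : PySem.List.min? (PySem.Set.ofList L) (fun x => x) with
    | none =>
      rw [PySem.List.min?_eq_none_iff] at hS
      have : m ∈ PySem.Set.ofList L := (PySem.Set.mem_ofList _ _).mpr hmem
      rw [hS] at this
      exact absurd this (List.not_mem_nil)
    | some m' =>
      have hm'mem : m' ∈ L := (PySem.Set.mem_ofList _ _).mp (PySem.List.min?_mem hS)
      have h1 : m ≤ m' := PySem.List.min?_isMin hL m' hm'mem
      have h2 : m' ≤ m := PySem.List.min?_isMin hS m ((PySem.Set.mem_ofList _ _).mpr hmem)
      rw [le_antisymm h2 h1]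

-- A's value is count-of-min of the per-position distance list
lemma pv_A_eq_countmin (f s : List Char) :
    (match PySem.List.min? (pvDistanceA (pvLocA s) f).keys (fun x => x) with
     | none => (0 : Int)
     | some m => (pvDistanceA (pvLocA s) f).getD m 0)
    = (match PySem.List.min? (pvDists (pvLastB s) f) (fun x => x) with
       | none => (0 : Int)
       | some m => ((pvDists (pvLastB s) f).count m : Int)) := by
  rw [pv_distanceA_eq_counter, PySem.Dict.keys_counter, pv_min_ofList]
  cases h : PySem.List.min? (pvDists (pvLastB s) f) (fun x => x) with
  | none => rfl
  | some m => simp only [PySem.Dict.getD_counter]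

-- ---- B side: the items of the first-occurrence dict ----

-- the items the setdefault loop accumulates: one (c, i) per NEW character, in traversal order
def pvFirstItems : List (Int × Char) → List Char → List (Char × Int)
  | [], _ => []
  | ic :: ps, seen =>
    if ic.2 ∈ seen then pvFirstItems ps seen
    else (ic.2, ic.1) :: pvFirstItems ps (ic.2 :: seen)

lemma pv_items_fold_setdefault (ps : List (Int × Char)) (d : PySem.Dict Char Int) (seen : List Char)
    (h : ∀ c, c ∈ seen ↔ d.contains c = true) :
    (ps.foldl (fun d ic => d.setdefault ic.2 ic.1) d).items = d.items ++ pvFirstItems ps seen := by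
  induction ps generalizing d seen with
  | nil => simp [pvFirstItems]
  | cons p ps ih =>
    simp only [List.foldl_cons, pvFirstItems]
    by_cases hp : p.2 ∈ seen
    · rw [if_pos hp, PySem.Dict.setdefault_of_contains d p.1 ((h p.2).mp hp)]
      exact ih d seen h
    · have hc : d.contains p.2 = false := by
        cases hcc : d.contains p.2
        · rfl
        · exact absurd ((h p.2).mpr hcc) hp
      rw [if_neg hp, PySem.Dict.setdefault_of_not_contains d p.1 hc]
      rw [ih (d.insert p.2 p.1) (p.2 :: seen) ?_]
      · rw [PySem.Dict.items_insert_of_not_contains d p.1 hc, List.append_assoc]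
        rfl
      · intro c
        rw [PySem.Dict.contains_insert]
        constructor
        · intro hm
          rcases List.mem_cons.mp hm with h1 | h1
          · simp [h1]
          · simp [(h c).mp h1]
        · intro hm
          rcases Bool.or_eq_true _ _ |>.mp hm with h1 | h1
          · exact List.mem_cons.mpr (Or.inl (by simpa using h1))
          · exact List.mem_cons.mpr (Or.inr ((h c).mpr h1))

lemma pv_firstB_items (f : List Char) :
    (pvFirstB f).items = pvFirstItems (PySem.List.enumerate f) [] := by
  unfold pvFirstB
  rw [pv_items_fold_setdefault _ _ [] (fun c => by simp [PySem.Dict.contains_empty])]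
  simp [show (PySem.Dict.empty : PySem.Dict Char Int).items = [] from rfl]

-- membership in the first-occurrence items: c unseen, (i, c) occurs, and i is its least index
lemma pv_mem_firstItems (ps : List (Int × Char)) (seen : List Char)
    (hps : ps.Pairwise (fun p q => p.1 < q.1)) (c : Char) (i : Int) :
    (c, i) ∈ pvFirstItems ps seen ↔
      c ∉ seen ∧ (i, c) ∈ ps ∧ ∀ i', (i', c) ∈ ps → i ≤ i' := by
  revert hps
  induction ps generalizing seen with
  | nil => intro _; simp [pvFirstItems]
  | cons p ps ih =>
    intro hps
    obtain ⟨j, b⟩ := p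
    have hlt : ∀ q ∈ ps, j < q.1 := by
      have := (List.pairwise_cons.mp hps).1
      simpa using this
    have htl : ps.Pairwise (fun p q => p.1 < q.1) := (List.pairwise_cons.mp hps).2
    simp only [pvFirstItems]
    by_cases hp : b ∈ seen
    · rw [if_pos hp, ih seen htl]
      constructor
      · rintro ⟨h1, h2, h3⟩
        refine ⟨h1, List.mem_cons.mpr (Or.inr h2), ?_⟩
        intro i' hi'
        rcases List.mem_cons.mp hi' with he | hm
        · obtain ⟨-, hc2⟩ : i' = j ∧ c = b := by simpa using he
          exact absurd (show c ∈ seen by rwa [hc2]) h1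
        · exact h3 i' hm
      · rintro ⟨h1, h2, h3⟩
        rcases List.mem_cons.mp h2 with he | hm
        · obtain ⟨-, hc2⟩ : i = j ∧ c = b := by simpa using he
          exact absurd (show c ∈ seen by rwa [hc2]) h1
        · exact ⟨h1, hm, fun i' hi' => h3 i' (List.mem_cons.mpr (Or.inr hi'))⟩
    · rw [if_neg hp]
      constructor
      · intro hm
        rcases List.mem_cons.mp hm with he | hm2
        · obtain ⟨hc1, hc2⟩ : c = b ∧ i = j := by simpa using he
          refine ⟨(by rwa [hc1]), List.mem_cons.mpr (Or.inl (by simp [hc1, hc2])), ?_⟩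
          intro i' hi'
          rcases List.mem_cons.mp hi' with he2 | hm3
          · have hij : i' = j := by simpa using congrArg Prod.fst he2
            omega
          · have h4 : j < i' := hlt _ hm3
            omega
        · obtain ⟨h1, h2, h3⟩ := (ih (b :: seen) htl).mp hm2
          have hcb : c ≠ b := fun he => h1 (he ▸ List.mem_cons_self)
          refine ⟨fun hc => h1 (List.mem_cons.mpr (Or.inr hc)), List.mem_cons.mpr (Or.inr h2), ?_⟩
          intro i' hi'
          rcases List.mem_cons.mp hi' with he2 | hm3
          · exact absurd (by simpa using congrArg Prod.snd he2) hcb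
          · exact h3 i' hm3
      · rintro ⟨h1, h2, h3⟩
        by_cases hcb : c = b
        · subst hcb
          have hij : i = j := by
            rcases List.mem_cons.mp h2 with he | hm
            · simpa using congrArg Prod.fst he
            · have hle := h3 j (List.mem_cons.mpr (Or.inl rfl))
              have hgt := hlt _ hm
              simp at hgt
              omega
          subst hij
          exact List.mem_cons.mpr (Or.inl rfl)
        · have hm : (i, c) ∈ ps := by
            rcases List.mem_cons.mp h2 with he | hm
            · exact absurd (by simpa using congrArg Prod.snd he) hcb
            · exact hm
          refine List.mem_cons.mpr (Or.inr ((ih (b :: seen) htl).mpr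
            ⟨?_, hm, fun i' hi' => h3 i' (List.mem_cons.mpr (Or.inr hi'))⟩))
          intro hc
          rcases List.mem_cons.mp hc with he | hmm
          · exact hcb he
          · exact h1 hmm

-- the characters of the first-occurrence items are distinct and unseen
lemma pv_firstItems_chars_nodup (ps : List (Int × Char)) (seen : List Char) :
    ((pvFirstItems ps seen).map (·.1)).Nodup ∧
      ∀ c ∈ (pvFirstItems ps seen).map (·.1), c ∉ seen := by
  induction ps generalizing seen with
  | nil => simp [pvFirstItems]
  | cons p ps ih =>
    simp only [pvFirstItems]
    by_cases hp : p.2 ∈ seen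
    · rw [if_pos hp]; exact ih seen
    · rw [if_neg hp]
      obtain ⟨hnd, hns⟩ := ih (p.2 :: seen)
      simp only [List.map_cons, List.nodup_cons]
      refine ⟨⟨fun hc => (hns p.2 hc) List.mem_cons_self, hnd⟩, ?_⟩
      intro c hc
      rcases List.mem_cons.mp hc with he | hm
      · exact he ▸ hp
      · exact fun hcs => hns c hm (List.mem_cons.mpr (Or.inr hcs))

-- the per-character distance list B forms, written over the first-occurrence items
def pvGD (last : PySem.Dict Char Int) : Char × Int → Option Int :=
  fun ci => (last.get? ci.1).map (fun j => ci.2 - j)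

def pvDlist (last : PySem.Dict Char Int) (f : List Char) : List Int :=
  (pvFirstItems (PySem.List.enumerate f) []).filterMap (pvGD last)

lemma pv_distsB_eq (f : List Char) (last : PySem.Dict Char Int) :
    pvDistsB (pvFirstB f) last = pvDlist last f := by
  unfold pvDistsB pvDlist pvGD
  rw [pv_firstB_items]

-- every per-character distance is a per-position distance
lemma pv_D_sub_L (f : List Char) (last : PySem.Dict Char Int) :
    ∀ x ∈ pvDlist last f, x ∈ pvDists last f := by
  intro x hx
  obtain ⟨ci, hci, hgd⟩ := List.mem_filterMap.mp hx
  obtain ⟨c, i⟩ := ci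
  obtain ⟨-, h2, -⟩ := (pv_mem_firstItems _ _ (PySem.List.pairwise_lt_enumerate f 0) c i).mp hci
  exact List.mem_filterMap.mpr ⟨(i, c), h2, hgd⟩

-- a position attaining the minimal distance is the FIRST occurrence of its character
lemma pv_attain (f : List Char) (last : PySem.Dict Char Int) (m : Int)
    (hmin : ∀ y ∈ pvDists last f, m ≤ y) (i : Int) (c : Char) (j : Int)
    (hm : (i, c) ∈ PySem.List.enumerate f) (hj : last.get? c = some j) (he : i - j = m) :
    (c, i) ∈ pvFirstItems (PySem.List.enumerate f) [] := by
  rw [pv_mem_firstItems _ _ (PySem.List.pairwise_lt_enumerate f 0)]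
  refine ⟨List.not_mem_nil, hm, ?_⟩
  intro i' hi'
  have hL : i' - j ∈ pvDists last f :=
    List.mem_filterMap.mpr ⟨(i', c), hi', by simp [hj]⟩
  have := hmin _ hL
  omega

-- the two lists have the same minimum
lemma pv_min_eq (f : List Char) (last : PySem.Dict Char Int) :
    PySem.List.min? (pvDlist last f) (fun x => x) = PySem.List.min? (pvDists last f) (fun x => x) := by
  cases hL : PySem.List.min? (pvDists last f) (fun x => x) with
  | none =>
    rw [PySem.List.min?_eq_none_iff] at hL
    rw [PySem.List.min?_eq_none_iff]
    cases hD : pvDlist last f with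
    | nil => rfl
    | cons x t =>
      have : x ∈ pvDists last f := pv_D_sub_L f last x (hD ▸ List.mem_cons_self)
      rw [hL] at this
      exact absurd this (List.not_mem_nil)
  | some m =>
    have hmem := PySem.List.min?_mem hL
    have hmin := PySem.List.min?_isMin hL
    obtain ⟨ic, hic, hg⟩ := List.mem_filterMap.mp hmem
    obtain ⟨i, c⟩ := ic
    obtain ⟨j, hj, hij⟩ := Option.map_eq_some_iff.mp hg
    have hfi : (c, i) ∈ pvFirstItems (PySem.List.enumerate f) [] :=
      pv_attain f last m hmin i c j hic hj hij
    have hmD : m ∈ pvDlist last f :=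
      List.mem_filterMap.mpr ⟨(c, i), hfi, by simp [pvGD, hj, hij]⟩
    cases hDm : PySem.List.min? (pvDlist last f) (fun x => x) with
    | none =>
      rw [PySem.List.min?_eq_none_iff] at hDm
      rw [hDm] at hmD
      exact absurd hmD (List.not_mem_nil)
    | some m' =>
      have h1 : m ≤ m' := hmin m' (pv_D_sub_L f last m' (PySem.List.min?_mem hDm))
      have h2 : m' ≤ m := PySem.List.min?_isMin hDm m hmD
      rw [le_antisymm h2 h1]

-- at the minimum the per-character count equals the per-position count
lemma pv_count_eq (f : List Char) (last : PySem.Dict Char Int) (m : Int)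
    (hL : PySem.List.min? (pvDists last f) (fun x => x) = some m) :
    (pvDlist last f).count m = (pvDists last f).count m := by
  have hmin := PySem.List.min?_isMin hL
  have hps : (PySem.List.enumerate f).Pairwise (fun p q => p.1 < q.1) :=
    PySem.List.pairwise_lt_enumerate f 0
  unfold pvDists pvDlist at *
  rw [List.count_filterMap, List.count_filterMap,
      List.countP_eq_length_filter, List.countP_eq_length_filter]
  have hndL : (((PySem.List.enumerate f).filter
      (fun a => (last.get? a.2).map (fun j => a.1 - j) == some m)).map (·.2)).Nodup := by
    refine List.Nodup.map_on ?_ ((List.Nodup.filter _) ?_)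
    · intro x hx y hy hxy
      obtain ⟨-, hpx⟩ := List.mem_filter.mp hx
      obtain ⟨-, hpy⟩ := List.mem_filter.mp hy
      obtain ⟨jx, hjx, hex⟩ := Option.map_eq_some_iff.mp (eq_of_beq hpx)
      obtain ⟨jy, hjy, hey⟩ := Option.map_eq_some_iff.mp (eq_of_beq hpy)
      rw [hxy, hjy] at hjx
      obtain rfl := Option.some.inj hjx
      exact Prod.ext (by omega) hxy
    · exact List.Pairwise.imp (fun h he => absurd (congrArg Prod.fst he) (ne_of_lt h)) hps
  have hndD : (((pvFirstItems (PySem.List.enumerate f) []).filter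
      (fun a => pvGD last a == some m)).map (·.1)).Nodup :=
    (pv_firstItems_chars_nodup (PySem.List.enumerate f) []).1.sublist
      (List.Sublist.map _ List.filter_sublist)
  have hmemeq : ∀ a, a ∈ (((pvFirstItems (PySem.List.enumerate f) []).filter
        (fun a => pvGD last a == some m)).map (·.1))
      ↔ a ∈ (((PySem.List.enumerate f).filter
        (fun a => (last.get? a.2).map (fun j => a.1 - j) == some m)).map (·.2)) := by
    intro a
    constructor
    · intro ha
      obtain ⟨ci, hci, rfl⟩ := List.mem_map.mp ha
      obtain ⟨hmem, hpc⟩ := List.mem_filter.mp hci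
      obtain ⟨c, i⟩ := ci
      obtain ⟨-, h2, -⟩ := (pv_mem_firstItems _ _ hps c i).mp hmem
      refine List.mem_map.mpr ⟨(i, c), List.mem_filter.mpr ⟨h2, ?_⟩, rfl⟩
      simpa [pvGD] using hpc
    · intro ha
      obtain ⟨ic, hic, rfl⟩ := List.mem_map.mp ha
      obtain ⟨hmem, hpc⟩ := List.mem_filter.mp hic
      obtain ⟨i, c⟩ := ic
      obtain ⟨j, hj, he⟩ := Option.map_eq_some_iff.mp (eq_of_beq hpc)
      have hfi : (c, i) ∈ pvFirstItems (PySem.List.enumerate f) [] :=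
        pv_attain f last m hmin i c j hmem hj he
      refine List.mem_map.mpr ⟨(c, i), List.mem_filter.mpr ⟨hfi, ?_⟩, rfl⟩
      simp [pvGD, hj, he]
  have hlen := ((List.perm_ext_iff_of_nodup hndD hndL).mpr hmemeq).length_eq
  simpa [List.length_map] using hlen

-- ===== VERDICT (by name: the statement is the Claim_ definition above) =====
theorem countQuadruples_spec : Claim_equal_countQuadruples := by
  intro f s _
  unfold Spec_countQuadruples countQuadruples countQuadruples_alt
  rw [pv_A_eq_countmin, pv_distsB_eq, pv_min_eq]
  cases hL : PySem.List.min? (pvDists (pvLastB s.toList) f.toList) (fun x => x) with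
  | none => rfl
  | some m =>
    simp only [PySem.List.count_eq]
    rw [pv_count_eq f.toList (pvLastB s.toList) m hL]
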